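-- pv_equiv track=rewrite | github.com/zfifteen/prime-gap-structure | benchmarks/python/sha_nonce/ascii_delta_geometry_probe.py | trailing_zero_depth
-- ===== SOURCE A (Python) =====
-- def trailing_zero_depth(index: int) -> int:
--     """Return the decimal trailing-zero depth of the current index."""
--     depth = 0
--     text = str(index)
--     for char in reversed(text):
--         if char != "0":
--             break
--         depth += 1
--     return depth
-- ===== SOURCE B (Python) =====
-- def trailing_zero_depth(index: int) -> int:
--     """Return the decimal trailing-zero depth of the current index.
--
--     Arithmetic version: count how many times 10 divides |index|,
--     without converting to a string. 0 consists of the single digit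
--     '0', so its depth is 1.
--     """
--     n = abs(index)
--     if n == 0:
--         return 1
--     depth = 0
--     while n % 10 == 0:
--         n //= 10
--         depth += 1
--     return depth
-- ===== Notes on version B (the rewrite author's own statement) =====
-- stated objective: alternative
-- what changed: Replaces A's string conversion and reversed-character scan by pure arithmetic: repeatedly divide |index| by 10 while it is divisible, counting the steps (0 is the single digit '0', depth 1).
import Mathlib
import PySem

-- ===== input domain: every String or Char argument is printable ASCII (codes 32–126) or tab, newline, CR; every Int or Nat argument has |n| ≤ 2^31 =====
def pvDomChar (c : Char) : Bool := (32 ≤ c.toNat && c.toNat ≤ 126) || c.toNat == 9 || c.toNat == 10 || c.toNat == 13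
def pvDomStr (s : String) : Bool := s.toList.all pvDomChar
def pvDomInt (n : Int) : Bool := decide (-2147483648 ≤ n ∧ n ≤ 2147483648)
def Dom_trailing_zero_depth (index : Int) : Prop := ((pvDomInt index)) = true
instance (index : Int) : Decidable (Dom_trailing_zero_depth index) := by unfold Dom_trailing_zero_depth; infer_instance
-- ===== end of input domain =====

-- B replaces A's string conversion + reversed-character scan by pure arithmetic:
-- repeatedly divide |index| by 10 while divisible, counting the steps (alternative algorithm, same cost).

-- ===== PORT A =====
-- the for-loop over reversed(text) with break, accumulating depth
def tzdLoop : List Char → Int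
  | [] => 0
  | c :: rest => if c ≠ '0' then 0 else 1 + tzdLoop rest

def trailing_zero_depth (index : Int) : Int :=
  tzdLoop (PySem.Int.toStr index).toList.reverse

-- ===== PORT B =====
-- B's while-loop: while n % 10 == 0: n //= 10; depth += 1 (the n ≠ 0 guard only
-- makes the recursion total; the loop is entered with n > 0 and keeps n > 0).
def tzdAltLoop (n : Nat) : Int :=
  if h : n % 10 = 0 ∧ n ≠ 0 then 1 + tzdAltLoop (n / 10) else 0
termination_by n
decreasing_by exact Nat.div_lt_self (Nat.pos_of_ne_zero h.2) (by omega)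

def trailing_zero_depth_alt (index : Int) : Int :=
  let n := index.natAbs     -- abs(index)
  if n = 0 then 1 else tzdAltLoop n

-- ===== PRECONDITION & SPEC =====
def Spec_trailing_zero_depth (index : Int) (out : Int) : Prop := out = trailing_zero_depth_alt index
instance (index : Int) (out : Int) : Decidable (Spec_trailing_zero_depth index out) := by unfold Spec_trailing_zero_depth; infer_instance

-- ===== CLAIM (what is proved, stated in full; the proofs are below) =====
def Claim_equal_trailing_zero_depth : Prop := ∀ (index : Int), Dom_trailing_zero_depth index → Spec_trailing_zero_depth index (trailing_zero_depth index)

-- ===== LEMMAS AND PROOFS =====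

-- the decimal character list of n, most-significant digit first (fuel-free form of Nat.toDigits 10)
def decChars (n : Nat) : List Char :=
  if n < 10 then [Nat.digitChar n]
  else decChars (n / 10) ++ [Nat.digitChar (n % 10)]
termination_by n
decreasing_by exact Nat.div_lt_self (by omega) (by omega)

theorem toDigitsCore_eq_decChars (f : Nat) : ∀ (n : Nat) (ds : List Char), n < f →
    Nat.toDigitsCore 10 f n ds = decChars n ++ ds := by
  induction f with
  | zero => intro n ds h; omega
  | succ f ih =>
    intro n ds _
    rw [Nat.toDigitsCore]
    by_cases h10 : n < 10
    · have : n / 10 = 0 := Nat.div_eq_of_lt h10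
      rw [decChars]
      simp [this, h10, Nat.mod_eq_of_lt h10]
    · have hq : n / 10 ≠ 0 := by
        intro hc; exact h10 (by omega : n < 10)
      have hlt : n / 10 < f := by
        have := Nat.div_lt_self (by omega : 0 < n) (by omega : 1 < 10)
        omega
      rw [decChars]
      simp only [h10, if_neg hq]
      rw [ih (n / 10) (Nat.digitChar (n % 10) :: ds) hlt]
      simp

theorem toDigits_eq_decChars (n : Nat) : Nat.toDigits 10 n = decChars n :=
  (toDigitsCore_eq_decChars (n + 1) n [] (Nat.lt_succ_self n)).trans (by simp)

theorem digitChar_eq_zero_iff {d : Nat} (h : d < 10) : Nat.digitChar d = '0' ↔ d = 0 := by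
  interval_cases d <;> simp <;> decide

-- trailing-zero digits of n (with anything appended after the reversed digits) = B's divmod count
theorem tzd_decChars (n : Nat) (hn : 0 < n) :
    ∀ ys, tzdLoop ((decChars n).reverse ++ ys) = tzdAltLoop n := by
  induction n using Nat.strong_induction_on with
  | _ n ih =>
    intro ys
    by_cases h10 : n < 10
    · have hne : Nat.digitChar n ≠ '0' := by rw [Ne, digitChar_eq_zero_iff h10]; omega
      rw [decChars, if_pos h10]
      simp only [List.reverse_cons, List.reverse_nil, List.nil_append, List.cons_append,
        tzdLoop.eq_2]
      rw [if_pos hne, tzdAltLoop, dif_neg (by rw [Nat.mod_eq_of_lt h10]; omega)]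
    · rw [decChars, if_neg h10]
      simp only [List.reverse_append, List.reverse_cons, List.reverse_nil, List.nil_append,
        List.cons_append, tzdLoop.eq_2]
      by_cases hm : n % 10 = 0
      · have hq : 0 < n / 10 := Nat.div_pos (by omega) (by omega)
        have hlt : n / 10 < n := Nat.div_lt_self (by omega) (by omega)
        have hz : Nat.digitChar (n % 10) = '0' := by rw [hm]; rfl
        rw [if_neg (by simp [hz]), ih (n / 10) hlt hq ys]
        conv_rhs => rw [tzdAltLoop, dif_pos (⟨hm, by omega⟩ : n % 10 = 0 ∧ n ≠ 0)]
      · have hne : Nat.digitChar (n % 10) ≠ '0' := by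
          rw [Ne, digitChar_eq_zero_iff (Nat.mod_lt n (by omega))]; exact hm
        rw [if_pos hne, tzdAltLoop, dif_neg (by tauto)]

-- ===== VERDICT (by name: the statement is the Claim_ definition above) =====
theorem trailing_zero_depth_spec : Claim_equal_trailing_zero_depth := by
  intro index _
  unfold Spec_trailing_zero_depth trailing_zero_depth trailing_zero_depth_alt
  simp only [PySem.Int.toList_toStr, PySem.Int.toChars]
  rcases lt_trichotomy index 0 with hlt | heq | hgt
  · have habs : index.natAbs ≠ 0 := by omega
    rw [if_pos hlt, if_neg habs]
    simp only [List.reverse_cons]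
    rw [toDigits_eq_decChars]
    exact tzd_decChars index.natAbs (by omega) ['-']
  · subst heq; decide
  · have habs : index.natAbs ≠ 0 := by omega
    have htn : index.toNat = index.natAbs := by omega
    rw [if_neg (by omega : ¬ index < 0), if_neg habs, htn, toDigits_eq_decChars]
    have := tzd_decChars index.natAbs (by omega) []
    simpa using this
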